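-- pv_equiv track=rewrite | github.com/zxy18644930000-ship-it/Scripts | price_sum_workbench.py | _smart_round_volumes
-- ===== SOURCE A (Python) =====
-- def _smart_round_volumes(total_volume, mode='entry'):
--     """智能分轮：entry=条件单友好少轮次，exit=效率优先拆粗"""
--     if total_volume <= 0:
--         return []
--     if total_volume <= 3:
--         return [total_volume]
--     if mode == 'exit':
--         if total_volume <= 8:
--             per = 3
--         elif total_volume <= 20:
--             per = 5
--         else:
--             per = 10
--     else:
--         if total_volume <= 6:
--             per = 3
--         elif total_volume <= 15:
--             per = 5
--         elif total_volume <= 30: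
--             per = 5
--         else:
--             per = 10
--     rounds = []
--     rem = total_volume
--     while rem > 0:
--         rounds.append(min(per, rem))
--         rem -= rounds[-1]
--     return rounds
-- ===== SOURCE B (Python) =====
-- def _smart_round_volumes(total_volume, mode='entry'):
--     """Closed-form chunking: full chunks by integer division plus optional remainder."""
--     if total_volume <= 0:
--         return []
--     if total_volume <= 3:
--         return [total_volume]
--     if mode == 'exit':
--         if total_volume <= 8:
--             per = 3
--         elif total_volume <= 20:
--             per = 5
--         else:
--             per = 10
--     else:
--         if total_volume <= 6:
--             per = 3
--         elif total_volume <= 15: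
--             per = 5
--         elif total_volume <= 30:
--             per = 5
--         else:
--             per = 10
--     count = total_volume // per
--     rem = total_volume % per
--     return [per] * count + ([rem] if rem > 0 else [])
-- ===== Notes on version B (the rewrite author's own statement) =====
-- stated objective: alternative
-- what changed: Replaced the while-loop of repeated subtraction with a closed-form construction: count = total_volume // per full chunks by list multiplication plus an optional remainder chunk from total_volume % per.
import Mathlib
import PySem

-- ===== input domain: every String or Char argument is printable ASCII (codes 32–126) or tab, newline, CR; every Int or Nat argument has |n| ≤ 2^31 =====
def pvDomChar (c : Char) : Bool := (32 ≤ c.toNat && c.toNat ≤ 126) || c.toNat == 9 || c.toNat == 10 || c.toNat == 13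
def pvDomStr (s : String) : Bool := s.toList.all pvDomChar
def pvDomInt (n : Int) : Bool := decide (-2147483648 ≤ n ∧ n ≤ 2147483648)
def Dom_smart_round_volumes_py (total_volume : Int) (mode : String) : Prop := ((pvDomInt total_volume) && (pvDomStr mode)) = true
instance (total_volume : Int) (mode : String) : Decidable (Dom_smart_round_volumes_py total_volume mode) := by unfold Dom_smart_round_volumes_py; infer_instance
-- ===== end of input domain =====

-- B replaces A's subtract-until-empty while-loop with a closed form (quotient many
-- full chunks plus an optional remainder chunk); objective: alternative decomposition.

-- ===== PORT A =====
-- the while-loop: while rem > 0: rounds.append(min(per, rem)); rem -= rounds[-1]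
-- (the '0 < per' conjunct is only a totality guard; at every call site per ∈ {3,5,10})
def pvLoopA (per rem : Int) : List Int :=
  if h : 0 < rem ∧ 0 < per then
    min per rem :: pvLoopA per (rem - min per rem)
  else []
termination_by rem.toNat
decreasing_by omega

def smart_round_volumes_py (total_volume : Int) (mode : String) : List Int :=
  if total_volume ≤ 0 then []
  else if total_volume ≤ 3 then [total_volume]
  else
    let per : Int :=
      if mode = "exit" then
        if total_volume ≤ 8 then 3
        else if total_volume ≤ 20 then 5
        else 10
      else
        if total_volume ≤ 6 then 3
        else if total_volume ≤ 15 then 5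
        else if total_volume ≤ 30 then 5
        else 10
    pvLoopA per total_volume

-- ===== PORT B =====
def smart_round_volumes_py_alt (total_volume : Int) (mode : String) : List Int :=
  if total_volume ≤ 0 then []
  else if total_volume ≤ 3 then [total_volume]
  else
    let per : Int :=
      if mode = "exit" then
        if total_volume ≤ 8 then 3
        else if total_volume ≤ 20 then 5
        else 10
      else
        if total_volume ≤ 6 then 3
        else if total_volume ≤ 15 then 5
        else if total_volume ≤ 30 then 5
        else 10
    let count := PySem.Int.floordiv total_volume per
    let rem := PySem.Int.mod total_volume per
    List.replicate count.toNat per ++ (if rem > 0 then [rem] else [])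

-- ===== PRECONDITION & SPEC =====
def Spec_smart_round_volumes_py (total_volume : Int) (mode : String) (out : List Int) : Prop := out = smart_round_volumes_py_alt total_volume mode
instance (total_volume : Int) (mode : String) (out : List Int) : Decidable (Spec_smart_round_volumes_py total_volume mode out) := by unfold Spec_smart_round_volumes_py; infer_instance

-- ===== CLAIM (what is proved, stated in full; the proofs are below) =====
def Claim_equal_smart_round_volumes_py : Prop := ∀ (total_volume : Int) (mode : String), Dom_smart_round_volumes_py total_volume mode → Spec_smart_round_volumes_py total_volume mode (smart_round_volumes_py total_volume mode)

-- ===== LEMMAS AND PROOFS =====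

-- the loop equals the closed form, for positive per and rem
theorem pvLoopA_closed (per : Int) (hp : 0 < per) :
    ∀ (n : Nat) (rem : Int), rem.toNat = n → 0 < rem →
      pvLoopA per rem =
        List.replicate (rem / per).toNat per ++ (if rem % per > 0 then [rem % per] else []) := by
  intro n
  induction n using Nat.strong_induction_on with
  | _ n ih =>
    intro rem hn hr
    rw [pvLoopA]
    rw [dif_pos ⟨hr, hp⟩]
    by_cases hle : rem ≤ per
    · have hmin : min per rem = rem := by omega
      rw [hmin]
      rw [pvLoopA, dif_neg (by omega)]
      by_cases heq : rem = per
      · subst heq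
        rw [Int.ediv_self (by omega), Int.emod_self]
        simp
      · have hlt : rem < per := by omega
        rw [Int.ediv_eq_zero_of_lt (by omega) hlt, Int.emod_eq_of_lt (by omega) hlt]
        simp [hr]
    · have hmin : min per rem = per := by omega
      rw [hmin]
      have hrec := ih (rem - per).toNat (by omega) (rem - per) rfl (by omega)
      rw [hrec]
      have hdiv : (rem - per) / per = rem / per - 1 := by
        have := Int.add_mul_ediv_right rem (-1) (by omega : per ≠ 0)
        have h2 : rem + -1 * per = rem - per := by ring
        rw [h2] at this
        omega
      have hmod : (rem - per) % per = rem % per :=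
        Int.sub_emod_right rem per
      rw [hdiv, hmod]
      have hq : 0 < rem / per := by
        have := (Int.le_ediv_iff_mul_le (a := 1) (b := rem) hp)
        omega
      have hrepl : (rem / per).toNat = ((rem / per - 1).toNat) + 1 := by omega
      rw [hrepl, List.replicate_succ]
      simp

theorem smart_round_volumes_py_eq (total_volume : Int) (mode : String) :
    smart_round_volumes_py total_volume mode = smart_round_volumes_py_alt total_volume mode := by
  unfold smart_round_volumes_py smart_round_volumes_py_alt
  by_cases h0 : total_volume ≤ 0
  · simp [h0]
  · by_cases h3 : total_volume ≤ 3
    · simp [h0, h3]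
    · simp only [if_neg h0, if_neg h3]
      have key : ∀ per : Int, 0 < per →
          pvLoopA per total_volume =
            List.replicate ((PySem.Int.floordiv total_volume per).toNat) per ++
              (if PySem.Int.mod total_volume per > 0 then [PySem.Int.mod total_volume per] else []) := by
        intro per hp
        rw [PySem.Int.floordiv_eq_ediv_of_pos hp, PySem.Int.mod_eq_emod_of_pos hp]
        exact pvLoopA_closed per hp total_volume.toNat total_volume rfl (by omega)
      set per : Int :=
        (if mode = "exit" then
          if total_volume ≤ 8 then 3
          else if total_volume ≤ 20 then 5
          else 10
        else
          if total_volume ≤ 6 then 3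
          else if total_volume ≤ 15 then 5
          else if total_volume ≤ 30 then 5
          else 10) with hper
      have hp : 0 < per := by rw [hper]; split_ifs <;> norm_num
      exact key per hp

-- ===== VERDICT (by name: the statement is the Claim_ definition above) =====
theorem smart_round_volumes_py_spec : Claim_equal_smart_round_volumes_py := by
  intro total_volume mode _
  unfold Spec_smart_round_volumes_py
  exact smart_round_volumes_py_eq total_volume mode
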